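-- pv_equiv track=rewrite | github.com/BTkachenko/KIKD | labs/lab6/encoder.py | high_pass_filter
-- ===== SOURCE A (Python) =====
-- def high_pass_filter(pixels, width, height):
--     filtered_pixels = []
--     for y in range(height):
--         for x in range(width):
--             center_pixel = pixels[y * width + x]
--             neighbors_sum = [0, 0, 0]
--             count = 0
--             for dy in range(-1, 2):
--                 for dx in range(-1, 2):
--                     nx, ny = x + dx, y + dy
--                     if 0 <= nx < width and 0 <= ny < height:
--                         neighbors_sum[0] += pixels[ny * width + nx][0]
--                         neighbors_sum[1] += pixels[ny * width + nx][1]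
--                         neighbors_sum[2] += pixels[ny * width + nx][2]
--                         count += 1
--             avg_neighbor = tuple(c // count for c in neighbors_sum)
--             filtered_pixel = tuple(max(0, min(255, 2 * center - avg)) for center, avg in zip(center_pixel, avg_neighbor))
--             filtered_pixels.append(filtered_pixel)
--     return filtered_pixels
-- ===== SOURCE B (Python) =====
-- def high_pass_filter(pixels, width, height):
--     if width <= 0 or height <= 0:
--         return []
--     # Per-row prefix-sum tables: for each row y and channel c,
--     # pref[c][j] = sum of that channel over the first j pixels of the row.
--     row_pref = []
--     for y in range(height):
--         pr, pg, pb = [0], [0], [0]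
--         r = g = b = 0
--         for x in range(width):
--             p = pixels[y * width + x]
--             r += p[0]
--             g += p[1]
--             b += p[2]
--             pr.append(r)
--             pg.append(g)
--             pb.append(b)
--         row_pref.append((pr, pg, pb))
--     out = []
--     for y in range(height):
--         y0 = max(0, y - 1)
--         y1 = min(height - 1, y + 1)
--         for x in range(width):
--             x0 = max(0, x - 1)
--             x1 = min(width - 1, x + 1)
--             sr = sg = sb = 0
--             for ny in range(y0, y1 + 1):
--                 pr, pg, pb = row_pref[ny]
--                 sr += pr[x1 + 1] - pr[x0]
--                 sg += pg[x1 + 1] - pg[x0]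
--                 sb += pb[x1 + 1] - pb[x0]
--             cnt = (x1 - x0 + 1) * (y1 - y0 + 1)
--             c = pixels[y * width + x]
--             out.append((max(0, min(255, 2 * c[0] - sr // cnt)),
--                         max(0, min(255, 2 * c[1] - sg // cnt)),
--                         max(0, min(255, 2 * c[2] - sb // cnt))))
--     return out
-- ===== Notes on version B (the rewrite author's own statement) =====
-- stated objective: alternative
-- what changed: Replaces the guarded 3x3 per-pixel neighbor scan by precomputed per-row prefix-sum tables: each pixel's window sum comes from two prefix lookups per row over clamped window bounds, with the neighbor count computed in closed form instead of counted.
import Mathlib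
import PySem

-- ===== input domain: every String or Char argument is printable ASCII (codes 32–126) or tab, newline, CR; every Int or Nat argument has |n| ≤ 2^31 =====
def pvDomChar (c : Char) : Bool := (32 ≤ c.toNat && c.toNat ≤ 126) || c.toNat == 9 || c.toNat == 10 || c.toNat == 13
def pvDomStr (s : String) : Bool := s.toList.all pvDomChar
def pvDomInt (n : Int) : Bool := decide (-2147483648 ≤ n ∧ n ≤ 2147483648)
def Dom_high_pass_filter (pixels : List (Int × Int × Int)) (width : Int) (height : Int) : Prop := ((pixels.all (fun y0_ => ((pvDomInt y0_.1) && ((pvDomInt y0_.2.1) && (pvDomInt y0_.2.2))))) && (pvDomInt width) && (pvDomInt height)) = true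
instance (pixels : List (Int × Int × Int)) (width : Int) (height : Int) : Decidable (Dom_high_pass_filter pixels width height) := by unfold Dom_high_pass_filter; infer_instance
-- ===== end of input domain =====

-- B replaces A's guarded 3x3 neighbor scan by precomputed per-row prefix-sum tables (two lookups
-- per row, closed-form neighbor count) — a different traversal of the same data.

-- ===== PORT A =====
def high_pass_filter (pixels : List (Int × Int × Int)) (width : Int) (height : Int) : List (Int × Int × Int) :=
  (PySem.List.pyRange 0 height 1).foldl (fun acc y =>
    (PySem.List.pyRange 0 width 1).foldl (fun acc x =>
      let center := PySem.List.pyGetD pixels (y * width + x) (0, 0, 0)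
      let st := (PySem.List.pyRange (-1) 2 1).foldl (fun st dy =>
        (PySem.List.pyRange (-1) 2 1).foldl (fun st dx =>
          let nx := x + dx
          let ny := y + dy
          if 0 ≤ nx ∧ nx < width ∧ 0 ≤ ny ∧ ny < height then
            let p := PySem.List.pyGetD pixels (ny * width + nx) (0, 0, 0)
            (st.1 + p.1, st.2.1 + p.2.1, st.2.2.1 + p.2.2, st.2.2.2 + 1)
          else st) st) ((0, 0, 0, 0) : Int × Int × Int × Int)
      let avg : Int × Int × Int :=
        (PySem.Int.floordiv st.1 st.2.2.2, PySem.Int.floordiv st.2.1 st.2.2.2,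
         PySem.Int.floordiv st.2.2.1 st.2.2.2)
      acc ++ [(max 0 (min 255 (2 * center.1 - avg.1)),
               max 0 (min 255 (2 * center.2.1 - avg.2.1)),
               max 0 (min 255 (2 * center.2.2 - avg.2.2)))]) acc) []

-- ===== PORT B =====
def high_pass_filter_alt (pixels : List (Int × Int × Int)) (width : Int) (height : Int) : List (Int × Int × Int) :=
  if width ≤ 0 ∨ height ≤ 0 then []
  else
    let row_pref := (PySem.List.pyRange 0 height 1).foldl (fun rp y =>
      let st := (PySem.List.pyRange 0 width 1).foldl (fun st x =>
        let p := PySem.List.pyGetD pixels (y * width + x) (0, 0, 0)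
        let r := st.2.2.2.1 + p.1
        let g := st.2.2.2.2.1 + p.2.1
        let b := st.2.2.2.2.2 + p.2.2
        (st.1 ++ [r], st.2.1 ++ [g], st.2.2.1 ++ [b], r, g, b))
        (([0], [0], [0], 0, 0, 0) : List Int × List Int × List Int × Int × Int × Int)
      rp ++ [(st.1, st.2.1, st.2.2.1)]) ([] : List (List Int × List Int × List Int))
    (PySem.List.pyRange 0 height 1).foldl (fun out y =>
      let y0 := max 0 (y - 1)
      let y1 := min (height - 1) (y + 1)
      (PySem.List.pyRange 0 width 1).foldl (fun out x =>
        let x0 := max 0 (x - 1)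
        let x1 := min (width - 1) (x + 1)
        let s := (PySem.List.pyRange y0 (y1 + 1) 1).foldl (fun s ny =>
          let row := PySem.List.pyGetD row_pref ny ([], [], [])
          (s.1 + (PySem.List.pyGetD row.1 (x1 + 1) 0 - PySem.List.pyGetD row.1 x0 0),
           s.2.1 + (PySem.List.pyGetD row.2.1 (x1 + 1) 0 - PySem.List.pyGetD row.2.1 x0 0),
           s.2.2 + (PySem.List.pyGetD row.2.2 (x1 + 1) 0 - PySem.List.pyGetD row.2.2 x0 0)))
          ((0, 0, 0) : Int × Int × Int)
        let cnt := (x1 - x0 + 1) * (y1 - y0 + 1)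
        let c := PySem.List.pyGetD pixels (y * width + x) (0, 0, 0)
        out ++ [(max 0 (min 255 (2 * c.1 - PySem.Int.floordiv s.1 cnt)),
                 max 0 (min 255 (2 * c.2.1 - PySem.Int.floordiv s.2.1 cnt)),
                 max 0 (min 255 (2 * c.2.2 - PySem.Int.floordiv s.2.2 cnt)))]) out) []

-- ===== PRECONDITION & SPEC =====
-- Pre_ excludes exactly the inputs where A raises IndexError: width and height positive but
-- fewer than width*height pixels.
def Pre_high_pass_filter (pixels : List (Int × Int × Int)) (width : Int) (height : Int) : Prop :=
  width ≤ 0 ∨ height ≤ 0 ∨ width * height ≤ (pixels.length : Int)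
instance (pixels : List (Int × Int × Int)) (width : Int) (height : Int) : Decidable (Pre_high_pass_filter pixels width height) := by unfold Pre_high_pass_filter; infer_instance

def pvWitness_high_pass_filter : (List (Int × Int × Int)) × Int × Int :=
  ([(10, 20, 30), (40, 50, 60), (5, 5, 5), (200, 100, 0)], 2, 2)

def Spec_high_pass_filter (pixels : List (Int × Int × Int)) (width : Int) (height : Int) (out : List (Int × Int × Int)) : Prop := out = high_pass_filter_alt pixels width height
instance (pixels : List (Int × Int × Int)) (width : Int) (height : Int) (out : List (Int × Int × Int)) : Decidable (Spec_high_pass_filter pixels width height out) := by unfold Spec_high_pass_filter; infer_instance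

-- ===== CLAIM (what is proved, stated in full; the proofs are below) =====
def Claim_equal_high_pass_filter : Prop := ∀ (pixels : List (Int × Int × Int)) (width : Int) (height : Int), Dom_high_pass_filter pixels width height → Pre_high_pass_filter pixels width height → Spec_high_pass_filter pixels width height (high_pass_filter pixels width height)

-- ===== LEMMAS AND PROOFS =====
lemma pv_win1d_sum (v n : Int) (t : Int → Int) (h0 : 0 ≤ v) (h1 : v < n) :
    (([-1,0,1] : List Int).map (fun d => if 0 ≤ v + d ∧ v + d < n then t (v + d) else 0)).sum
      = ((PySem.List.pyRange (max 0 (v-1)) (min (n-1) (v+1) + 1)).map t).sum := by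
  have e1 : v + -1 = v - 1 := by ring
  have e0 : v + 0 = v := by ring
  simp only [List.map_cons, List.map_nil, List.sum_cons, List.sum_nil, e1, e0]
  by_cases hl : 1 ≤ v <;> by_cases hr : v + 1 ≤ n - 1
  · rw [max_eq_right (by omega), min_eq_right (by omega)]
    rw [PySem.List.pyRange_one_cons (by omega), show v - 1 + 1 = v from by ring,
        PySem.List.pyRange_one_cons (by omega), show v + 1 = v + 1 from rfl,
        PySem.List.pyRange_one_cons (by omega), PySem.List.pyRange_one_eq_nil (by omega)]
    rw [if_pos (by omega), if_pos (by omega), if_pos (by omega)]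
    simp
  · rw [max_eq_right (by omega), min_eq_left (by omega)]
    rw [PySem.List.pyRange_one_cons (by omega), show v - 1 + 1 = v from by ring,
        PySem.List.pyRange_one_cons (by omega), PySem.List.pyRange_one_eq_nil (by omega)]
    rw [if_pos (by omega), if_pos (by omega), if_neg (by omega)]
    simp
  · rw [max_eq_left (by omega), min_eq_right (by omega)]
    have hv : v = 0 := by omega
    subst hv
    rw [PySem.List.pyRange_one_cons (by omega), show (0:Int) + 1 = 1 from rfl,
        PySem.List.pyRange_one_cons (by omega), PySem.List.pyRange_one_eq_nil (by omega)]
    rw [if_neg (by omega), if_pos (by omega), if_pos (by omega)]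
    simp
  · rw [max_eq_left (by omega), min_eq_left (by omega)]
    have hv : v = 0 := by omega
    have hn : n = 1 := by omega
    subst hv; subst hn
    rw [PySem.List.pyRange_one_cons (by omega), PySem.List.pyRange_one_eq_nil (by omega)]
    rw [if_neg (by omega), if_pos (by omega), if_neg (by omega)]
    simp

lemma pv_guard4 (l : List Int) (C : Int → Prop) [DecidablePred C] (t : Int → Int × Int × Int)
    (st : Int × Int × Int × Int) :
    l.foldl (fun st d => if C d then
        (st.1 + (t d).1, st.2.1 + (t d).2.1, st.2.2.1 + (t d).2.2, st.2.2.2 + 1) else st) st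
      = (st.1 + ((l.filter (fun d => decide (C d))).map (fun d => (t d).1)).sum,
         st.2.1 + ((l.filter (fun d => decide (C d))).map (fun d => (t d).2.1)).sum,
         st.2.2.1 + ((l.filter (fun d => decide (C d))).map (fun d => (t d).2.2)).sum,
         st.2.2.2 + (l.countP (fun d => decide (C d)) : Int)) := by
  induction l generalizing st with
  | nil => simp
  | cons a l ih =>
      by_cases h : C a
      · simp [h, ih]
        refine ⟨by ring, by ring, by ring, by ring⟩
      · simp [h, ih]

lemma pv_add4 (l : List Int) (f1 f2 f3 f4 : Int → Int) (st : Int × Int × Int × Int) :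
    l.foldl (fun st d => (st.1 + f1 d, st.2.1 + f2 d, st.2.2.1 + f3 d, st.2.2.2 + f4 d)) st
      = (st.1 + (l.map f1).sum, st.2.1 + (l.map f2).sum, st.2.2.1 + (l.map f3).sum,
         st.2.2.2 + (l.map f4).sum) := by
  induction l generalizing st with
  | nil => simp
  | cons a l ih => simp [ih]; refine ⟨by ring, by ring, by ring, by ring⟩

lemma pv_add3 (l : List Int) (f1 f2 f3 : Int → Int) (st : Int × Int × Int) :
    l.foldl (fun st d => (st.1 + f1 d, st.2.1 + f2 d, st.2.2 + f3 d)) st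
      = (st.1 + (l.map f1).sum, st.2.1 + (l.map f2).sum, st.2.2 + (l.map f3).sum) := by
  induction l generalizing st with
  | nil => simp
  | cons a l ih => simp [ih]; refine ⟨by ring, by ring, by ring⟩

lemma pv_getD_map_pyRange {β : Type} (f : Int → β) (n i : Int) (d : β) (h0 : 0 ≤ i) (h1 : i < n) :
    PySem.List.pyGetD ((PySem.List.pyRange 0 n).map f) i d = f i := by
  rw [PySem.List.pyGetD_of_nonneg _ _ h0]
  have hlen : i.toNat < ((PySem.List.pyRange 0 n).map f).length := by
    simp [PySem.List.length_pyRange_one]; omega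
  rw [List.getD_eq_getElem _ _ hlen]
  simp [PySem.List.getElem_pyRange_one]
  congr 1
  omega

def pvS (pixels : List (Int × Int × Int)) (w y : Int) (c : Int × Int × Int → Int) (a b : Int) : Int :=
  ((PySem.List.pyRange a b).map (fun i => c (PySem.List.pyGetD pixels (y * w + i) (0, 0, 0)))).sum

lemma pvS_succ (pixels : List (Int × Int × Int)) (w y : Int) (c : Int × Int × Int → Int) (a b : Int)
    (h : a ≤ b) :
    pvS pixels w y c a (b + 1) = pvS pixels w y c a b + c (PySem.List.pyGetD pixels (y * w + b) (0, 0, 0)) := by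
  unfold pvS
  rw [PySem.List.pyRange_one_succ_right h]
  simp

lemma pvS_split (pixels : List (Int × Int × Int)) (w y : Int) (c : Int × Int × Int → Int) (a m b : Int)
    (h1 : a ≤ m) (h2 : m ≤ b) :
    pvS pixels w y c a b = pvS pixels w y c a m + pvS pixels w y c m b := by
  unfold pvS
  rw [PySem.List.pyRange_one_append a m b h1 h2]
  simp

def pvRowT (pixels : List (Int × Int × Int)) (w y : Int) : List Int × List Int × List Int :=
  ((PySem.List.pyRange 0 (w + 1)).map (fun j => pvS pixels w y (fun p => p.1) 0 j),
   (PySem.List.pyRange 0 (w + 1)).map (fun j => pvS pixels w y (fun p => p.2.1) 0 j),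
   (PySem.List.pyRange 0 (w + 1)).map (fun j => pvS pixels w y (fun p => p.2.2) 0 j))

lemma pv_rowfold (pixels : List (Int × Int × Int)) (w y : Int) (n : Nat) :
    (PySem.List.pyRange 0 (n : Int)).foldl
      (fun (st : List Int × List Int × List Int × Int × Int × Int) x =>
        (st.1 ++ [st.2.2.2.1 + (PySem.List.pyGetD pixels (y * w + x) (0, 0, 0)).1],
         st.2.1 ++ [st.2.2.2.2.1 + (PySem.List.pyGetD pixels (y * w + x) (0, 0, 0)).2.1],
         st.2.2.1 ++ [st.2.2.2.2.2 + (PySem.List.pyGetD pixels (y * w + x) (0, 0, 0)).2.2],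
         st.2.2.2.1 + (PySem.List.pyGetD pixels (y * w + x) (0, 0, 0)).1,
         st.2.2.2.2.1 + (PySem.List.pyGetD pixels (y * w + x) (0, 0, 0)).2.1,
         st.2.2.2.2.2 + (PySem.List.pyGetD pixels (y * w + x) (0, 0, 0)).2.2))
      (([0], [0], [0], 0, 0, 0))
    = ((PySem.List.pyRange 0 ((n : Int) + 1)).map (fun j => pvS pixels w y (fun p => p.1) 0 j),
       (PySem.List.pyRange 0 ((n : Int) + 1)).map (fun j => pvS pixels w y (fun p => p.2.1) 0 j),
       (PySem.List.pyRange 0 ((n : Int) + 1)).map (fun j => pvS pixels w y (fun p => p.2.2) 0 j),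
       pvS pixels w y (fun p => p.1) 0 (n : Int),
       pvS pixels w y (fun p => p.2.1) 0 (n : Int),
       pvS pixels w y (fun p => p.2.2) 0 (n : Int)) := by
  induction n with
  | zero =>
      have h01 : PySem.List.pyRange (0:Int) 1 = [0] := by decide
      have h00 : PySem.List.pyRange (0:Int) 0 = [] := by decide
      simp [h01, h00, pvS]
  | succ n ih =>
      have hc : ((n + 1 : Nat) : Int) = (n : Int) + 1 := by push_cast; ring
      rw [hc, PySem.List.pyRange_one_succ_right (by positivity), List.foldl_append, ih]
      simp only [List.foldl_cons, List.foldl_nil]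
      rw [PySem.List.pyRange_one_succ_right (a := 0) (b := (n : Int) + 1) (by positivity),
          PySem.List.pyRange_one_succ_right (a := 0) (b := (n : Int)) (by positivity)]
      simp [pvS_succ pixels w y _ 0 (n : Int) (by positivity)]

lemma pv_sum_filter {α : Type} (l : List α) (P : α → Prop) [DecidablePred P] (f : α → Int) :
    ((l.filter (fun d => decide (P d))).map f).sum
      = (l.map (fun d => if P d then f d else 0)).sum := by
  induction l with
  | nil => simp
  | cons a l ih =>
      by_cases h : P a
      · simp [h, ih]
      · simp [h, ih]

lemma pv_cnt_filter {α : Type} (l : List α) (P : α → Prop) [DecidablePred P] :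
    ((l.countP (fun d => decide (P d))) : Int)
      = (l.map (fun d => if P d then (1:Int) else 0)).sum := by
  induction l with
  | nil => simp
  | cons a l ih =>
      by_cases h : P a
      · simp [h, ih, add_comm]
      · simp [h, ih]

def pvRect (pixels : List (Int × Int × Int)) (w : Int) (c : Int × Int × Int → Int)
    (y0 y1 x0 x1 : Int) : Int :=
  ((PySem.List.pyRange y0 (y1+1)).map (fun ny => pvS pixels w ny c x0 (x1+1))).sum

lemma pv_Ast (pixels : List (Int × Int × Int)) (w h x y : Int)
    (hx0 : 0 ≤ x) (hx1 : x < w) (hy0 : 0 ≤ y) (hy1 : y < h) :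
    (PySem.List.pyRange (-1) 2).foldl (fun st dy =>
      (PySem.List.pyRange (-1) 2).foldl (fun (st : Int × Int × Int × Int) dx =>
        if 0 ≤ x + dx ∧ x + dx < w ∧ 0 ≤ y + dy ∧ y + dy < h then
          (st.1 + (PySem.List.pyGetD pixels ((y + dy) * w + (x + dx)) (0, 0, 0)).1,
           st.2.1 + (PySem.List.pyGetD pixels ((y + dy) * w + (x + dx)) (0, 0, 0)).2.1,
           st.2.2.1 + (PySem.List.pyGetD pixels ((y + dy) * w + (x + dx)) (0, 0, 0)).2.2,
           st.2.2.2 + 1)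
        else st) st) ((0, 0, 0, 0) : Int × Int × Int × Int)
    = (pvRect pixels w (fun p => p.1) (max 0 (y-1)) (min (h-1) (y+1)) (max 0 (x-1)) (min (w-1) (x+1)),
       pvRect pixels w (fun p => p.2.1) (max 0 (y-1)) (min (h-1) (y+1)) (max 0 (x-1)) (min (w-1) (x+1)),
       pvRect pixels w (fun p => p.2.2) (max 0 (y-1)) (min (h-1) (y+1)) (max 0 (x-1)) (min (w-1) (x+1)),
       (min (w-1) (x+1) - max 0 (x-1) + 1) * (min (h-1) (y+1) - max 0 (y-1) + 1)) := by
  have hr : PySem.List.pyRange (-1) 2 = [-1, 0, 1] := by decide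
  simp only [pv_guard4, pv_add4, zero_add]
  have hin : ∀ (c : Int × Int × Int → Int) (dy : Int), 0 ≤ y + dy ∧ y + dy < h →
      (List.map (fun d1 => c (PySem.List.pyGetD pixels ((y + dy) * w + (x + d1)) (0, 0, 0)))
        (List.filter (fun d1 => decide (0 ≤ x + d1 ∧ x + d1 < w ∧ 0 ≤ y + dy ∧ y + dy < h))
          (PySem.List.pyRange (-1) 2))).sum
      = pvS pixels w (y + dy) c (max 0 (x-1)) (min (w-1) (x+1) + 1) := by
    intro c dy hQ
    have hfc : List.filter (fun d1 => decide (0 ≤ x + d1 ∧ x + d1 < w ∧ 0 ≤ y + dy ∧ y + dy < h))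
        (PySem.List.pyRange (-1) 2)
        = List.filter (fun d1 => decide (0 ≤ x + d1 ∧ x + d1 < w)) (PySem.List.pyRange (-1) 2) := by
      refine List.filter_congr ?_
      intro a _
      simp [hQ.1, hQ.2]
    rw [hfc, pv_sum_filter _ (fun d1 => 0 ≤ x + d1 ∧ x + d1 < w), hr,
        pv_win1d_sum x w (fun u => c (PySem.List.pyGetD pixels ((y + dy) * w + u) (0, 0, 0))) hx0 hx1]
    rfl
  have hnil : ∀ (dy : Int), ¬(0 ≤ y + dy ∧ y + dy < h) →
      List.filter (fun d1 => decide (0 ≤ x + d1 ∧ x + d1 < w ∧ 0 ≤ y + dy ∧ y + dy < h))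
        (PySem.List.pyRange (-1) 2) = [] := by
    intro dy hQ
    simp only [List.filter_eq_nil_iff]
    intro a _
    simp only [decide_eq_true_eq]
    omega
  have hcnt : ∀ (dy : Int), 0 ≤ y + dy ∧ y + dy < h →
      ((List.countP (fun d1 => decide (0 ≤ x + d1 ∧ x + d1 < w ∧ 0 ≤ y + dy ∧ y + dy < h))
        (PySem.List.pyRange (-1) 2)) : Int)
      = min (w-1) (x+1) + 1 - max 0 (x-1) := by
    intro dy hQ
    have hfc : ∀ (d1 : Int), (decide (0 ≤ x + d1 ∧ x + d1 < w ∧ 0 ≤ y + dy ∧ y + dy < h))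
        = (decide (0 ≤ x + d1 ∧ x + d1 < w)) := by
      intro d1; simp [hQ.1, hQ.2]
    simp only [hfc]
    rw [pv_cnt_filter _ (fun d1 => 0 ≤ x + d1 ∧ x + d1 < w), hr,
        pv_win1d_sum x w (fun _ => (1:Int)) hx0 hx1,
        PySem.List.sum_map_const_int, PySem.List.length_pyRange_one]
    rw [Int.toNat_of_nonneg (by omega)]
    ring
  simp only [Prod.mk.injEq]
  refine ⟨?_, ?_, ?_, ?_⟩
  · rw [List.map_congr_left (l := PySem.List.pyRange (-1) 2)
        (g := fun d => if 0 ≤ y + d ∧ y + d < h then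
          pvS pixels w (y + d) (fun p => p.1) (max 0 (x-1)) (min (w-1) (x+1) + 1) else 0)
        (by intro d _
            dsimp only
            by_cases hQ : 0 ≤ y + d ∧ y + d < h
            · rw [if_pos hQ, hin (fun p => p.1) d hQ]
            · rw [if_neg hQ, hnil d hQ]; simp),
        hr, pv_win1d_sum y h
          (fun u => pvS pixels w u (fun p => p.1) (max 0 (x-1)) (min (w-1) (x+1) + 1)) hy0 hy1]
    rfl
  · rw [List.map_congr_left (l := PySem.List.pyRange (-1) 2)
        (g := fun d => if 0 ≤ y + d ∧ y + d < h then
          pvS pixels w (y + d) (fun p => p.2.1) (max 0 (x-1)) (min (w-1) (x+1) + 1) else 0)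
        (by intro d _
            dsimp only
            by_cases hQ : 0 ≤ y + d ∧ y + d < h
            · rw [if_pos hQ, hin (fun p => p.2.1) d hQ]
            · rw [if_neg hQ, hnil d hQ]; simp),
        hr, pv_win1d_sum y h
          (fun u => pvS pixels w u (fun p => p.2.1) (max 0 (x-1)) (min (w-1) (x+1) + 1)) hy0 hy1]
    rfl
  · rw [List.map_congr_left (l := PySem.List.pyRange (-1) 2)
        (g := fun d => if 0 ≤ y + d ∧ y + d < h then
          pvS pixels w (y + d) (fun p => p.2.2) (max 0 (x-1)) (min (w-1) (x+1) + 1) else 0)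
        (by intro d _
            dsimp only
            by_cases hQ : 0 ≤ y + d ∧ y + d < h
            · rw [if_pos hQ, hin (fun p => p.2.2) d hQ]
            · rw [if_neg hQ, hnil d hQ]; simp),
        hr, pv_win1d_sum y h
          (fun u => pvS pixels w u (fun p => p.2.2) (max 0 (x-1)) (min (w-1) (x+1) + 1)) hy0 hy1]
    rfl
  · rw [List.map_congr_left (l := PySem.List.pyRange (-1) 2)
        (g := fun d => if 0 ≤ y + d ∧ y + d < h then
          min (w-1) (x+1) + 1 - max 0 (x-1) else 0)
        (by intro d _
            dsimp only
            by_cases hQ : 0 ≤ y + d ∧ y + d < h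
            · rw [if_pos hQ, hcnt d hQ]
            · rw [if_neg hQ, List.countP_eq_length_filter, hnil d hQ]; simp),
        hr, pv_win1d_sum y h (fun _ => min (w-1) (x+1) + 1 - max 0 (x-1)) hy0 hy1,
        PySem.List.sum_map_const_int, PySem.List.length_pyRange_one,
        Int.toNat_of_nonneg (by omega)]
    ring

lemma pv_Bst (pixels : List (Int × Int × Int)) (w h x y : Int)
    (hx0 : 0 ≤ x) (hx1 : x < w) (_hy0 : 0 ≤ y) (_hy1 : y < h) :
    (PySem.List.pyRange (max 0 (y-1)) (min (h-1) (y+1) + 1)).foldl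
      (fun (s : Int × Int × Int) ny =>
        (s.1 + (PySem.List.pyGetD (PySem.List.pyGetD ((PySem.List.pyRange 0 h).map (pvRowT pixels w)) ny ([], [], [])).1 (min (w-1) (x+1) + 1) 0
              - PySem.List.pyGetD (PySem.List.pyGetD ((PySem.List.pyRange 0 h).map (pvRowT pixels w)) ny ([], [], [])).1 (max 0 (x-1)) 0),
         s.2.1 + (PySem.List.pyGetD (PySem.List.pyGetD ((PySem.List.pyRange 0 h).map (pvRowT pixels w)) ny ([], [], [])).2.1 (min (w-1) (x+1) + 1) 0
              - PySem.List.pyGetD (PySem.List.pyGetD ((PySem.List.pyRange 0 h).map (pvRowT pixels w)) ny ([], [], [])).2.1 (max 0 (x-1)) 0),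
         s.2.2 + (PySem.List.pyGetD (PySem.List.pyGetD ((PySem.List.pyRange 0 h).map (pvRowT pixels w)) ny ([], [], [])).2.2 (min (w-1) (x+1) + 1) 0
              - PySem.List.pyGetD (PySem.List.pyGetD ((PySem.List.pyRange 0 h).map (pvRowT pixels w)) ny ([], [], [])).2.2 (max 0 (x-1)) 0)))
      ((0, 0, 0) : Int × Int × Int)
    = (pvRect pixels w (fun p => p.1) (max 0 (y-1)) (min (h-1) (y+1)) (max 0 (x-1)) (min (w-1) (x+1)),
       pvRect pixels w (fun p => p.2.1) (max 0 (y-1)) (min (h-1) (y+1)) (max 0 (x-1)) (min (w-1) (x+1)),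
       pvRect pixels w (fun p => p.2.2) (max 0 (y-1)) (min (h-1) (y+1)) (max 0 (x-1)) (min (w-1) (x+1))) := by
  simp only [pv_add3, zero_add]
  have hrow : ∀ ny, max 0 (y-1) ≤ ny → ny < min (h-1) (y+1) + 1 →
      PySem.List.pyGetD ((PySem.List.pyRange 0 h).map (pvRowT pixels w)) ny ([], [], [])
        = pvRowT pixels w ny := by
    intro ny h1 h2
    exact pv_getD_map_pyRange (pvRowT pixels w) h ny _ (by omega) (by omega)
  simp only [Prod.mk.injEq]
  refine ⟨?_, ?_, ?_⟩
  · rw [List.map_congr_left (g := fun ny => pvS pixels w ny (fun p => p.1) (max 0 (x-1)) (min (w-1) (x+1) + 1))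
      (by intro ny hmem
          rw [PySem.List.mem_pyRange_one] at hmem
          dsimp only
          rw [hrow ny hmem.1 hmem.2]
          unfold pvRowT
          dsimp only
          rw [pv_getD_map_pyRange _ (w+1) _ _ (by omega) (by omega),
              pv_getD_map_pyRange _ (w+1) _ _ (by omega) (by omega),
              pvS_split pixels w ny _ 0 (max 0 (x-1)) (min (w-1) (x+1) + 1) (by omega) (by omega)]
          ring)]
    rfl
  · rw [List.map_congr_left (g := fun ny => pvS pixels w ny (fun p => p.2.1) (max 0 (x-1)) (min (w-1) (x+1) + 1))
      (by intro ny hmem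
          rw [PySem.List.mem_pyRange_one] at hmem
          dsimp only
          rw [hrow ny hmem.1 hmem.2]
          unfold pvRowT
          dsimp only
          rw [pv_getD_map_pyRange _ (w+1) _ _ (by omega) (by omega),
              pv_getD_map_pyRange _ (w+1) _ _ (by omega) (by omega),
              pvS_split pixels w ny _ 0 (max 0 (x-1)) (min (w-1) (x+1) + 1) (by omega) (by omega)]
          ring)]
    rfl
  · rw [List.map_congr_left (g := fun ny => pvS pixels w ny (fun p => p.2.2) (max 0 (x-1)) (min (w-1) (x+1) + 1))
      (by intro ny hmem
          rw [PySem.List.mem_pyRange_one] at hmem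
          dsimp only
          rw [hrow ny hmem.1 hmem.2]
          unfold pvRowT
          dsimp only
          rw [pv_getD_map_pyRange _ (w+1) _ _ (by omega) (by omega),
              pv_getD_map_pyRange _ (w+1) _ _ (by omega) (by omega),
              pvS_split pixels w ny _ 0 (max 0 (x-1)) (min (w-1) (x+1) + 1) (by omega) (by omega)]
          ring)]
    rfl
lemma pv_main (pixels : List (Int × Int × Int)) (w h : Int) :
    high_pass_filter pixels w h = high_pass_filter_alt pixels w h := by
  by_cases hwh : w ≤ 0 ∨ h ≤ 0
  · rw [high_pass_filter_alt, if_pos hwh]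
    rcases hwh with hw | hh
    · simp [high_pass_filter, PySem.List.pyRange_one_eq_nil hw]
    · simp [high_pass_filter, PySem.List.pyRange_one_eq_nil hh]
  · have hw : 0 < w := by omega
    have hh : 0 < h := by omega
    rw [high_pass_filter_alt, if_neg (by omega)]
    simp only [high_pass_filter]
    have hW : ((w.toNat : Nat) : Int) = w := Int.toNat_of_nonneg (by omega)
    have hrowfold : ∀ y' : Int,
        (List.foldl
          (fun (st : List Int × List Int × List Int × Int × Int × Int) x =>
            (st.1 ++ [st.2.2.2.1 + (PySem.List.pyGetD pixels (y' * w + x) (0, 0, 0)).1],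
             st.2.1 ++ [st.2.2.2.2.1 + (PySem.List.pyGetD pixels (y' * w + x) (0, 0, 0)).2.1],
             st.2.2.1 ++ [st.2.2.2.2.2 + (PySem.List.pyGetD pixels (y' * w + x) (0, 0, 0)).2.2],
             st.2.2.2.1 + (PySem.List.pyGetD pixels (y' * w + x) (0, 0, 0)).1,
             st.2.2.2.2.1 + (PySem.List.pyGetD pixels (y' * w + x) (0, 0, 0)).2.1,
             st.2.2.2.2.2 + (PySem.List.pyGetD pixels (y' * w + x) (0, 0, 0)).2.2))
          (([0], [0], [0], 0, 0, 0)) (PySem.List.pyRange 0 w))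
        = ((PySem.List.pyRange 0 (w + 1)).map (fun j => pvS pixels w y' (fun p => p.1) 0 j),
           (PySem.List.pyRange 0 (w + 1)).map (fun j => pvS pixels w y' (fun p => p.2.1) 0 j),
           (PySem.List.pyRange 0 (w + 1)).map (fun j => pvS pixels w y' (fun p => p.2.2) 0 j),
           pvS pixels w y' (fun p => p.1) 0 w,
           pvS pixels w y' (fun p => p.2.1) 0 w,
           pvS pixels w y' (fun p => p.2.2) 0 w) := by
      intro y'
      have := pv_rowfold pixels w y' w.toNat
      rw [hW] at this
      exact this
    simp only [hrowfold]
    have hrp : List.foldl (fun rp y =>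
        rp ++ [((PySem.List.pyRange 0 (w+1)).map (fun j => pvS pixels w y (fun p => p.1) 0 j),
                (PySem.List.pyRange 0 (w+1)).map (fun j => pvS pixels w y (fun p => p.2.1) 0 j),
                (PySem.List.pyRange 0 (w+1)).map (fun j => pvS pixels w y (fun p => p.2.2) 0 j))])
        [] (PySem.List.pyRange 0 h) = (PySem.List.pyRange 0 h).map (pvRowT pixels w) := by
      rw [PySem.List.foldl_append_singleton_eq_map]
      rfl
    simp only [hrp]
    apply PySem.List.foldl_congr_mem
    intro acc y hy
    rw [PySem.List.mem_pyRange_one] at hy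
    apply PySem.List.foldl_congr_mem
    intro acc2 x hx
    rw [PySem.List.mem_pyRange_one] at hx
    dsimp only
    rw [pv_Ast pixels w h x y hx.1 hx.2 hy.1 hy.2, pv_Bst pixels w h x y hx.1 hx.2 hy.1 hy.2]

-- ===== VERDICT (by name: the statement is the Claim_ definition above) =====
theorem high_pass_filter_spec : Claim_equal_high_pass_filter := by
  intro pixels width height _ _
  unfold Spec_high_pass_filter
  exact pv_main pixels width height
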